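-- pv_equiv track=rewrite | github.com/Rahab666/python-project-lvl2 | gendiff/check_differences.py | key_sorting
-- ===== SOURCE A (Python) =====
-- import copy
--
-- def key_sorting(first_dict, second_dict):
--
--     first_keys = list(first_dict.keys())
--     second_keys = list(second_dict.keys())
--     all_keys = copy.deepcopy(first_keys)
--     first_keys_copy = copy.deepcopy(first_keys)
--     second_keys_copy = copy.deepcopy(second_keys)
--     all_keys.extend(second_keys_copy)
--     all_keys.sort()
--     equal_keys = []
--
--     for key in first_keys_copy:
--         if key in second_keys_copy:
--             if first_dict[key] == second_dict[key]:
--                 equal_keys.append(key)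
--                 first_keys.remove(key)
--                 second_keys.remove(key)
--                 all_keys.remove(key)
--             else:
--                 all_keys.remove(key)
--     return all_keys, first_keys, second_keys, equal_keys
-- ===== SOURCE B (Python) =====
-- def key_sorting(first_dict, second_dict):
--     equal = {k for k, v in first_dict.items()
--              if k in second_dict and second_dict[k] == v}
--     all_keys = sorted(set(first_dict) | set(second_dict))
--     first_keys = [k for k in first_dict if k not in equal]
--     second_keys = [k for k in second_dict if k not in equal]
--     equal_keys = [k for k in first_dict if k in equal]
--     return all_keys, first_keys, second_keys, equal_keys
-- ===== Notes on version B (the rewrite author's own statement) =====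
-- stated objective: simpler
-- what changed: A's single loop that mutates four lists with repeated list.remove scans is replaced by one precomputed set of equal-common keys, a sorted distinct union, and three independent order-preserving filter passes.
import Mathlib
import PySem

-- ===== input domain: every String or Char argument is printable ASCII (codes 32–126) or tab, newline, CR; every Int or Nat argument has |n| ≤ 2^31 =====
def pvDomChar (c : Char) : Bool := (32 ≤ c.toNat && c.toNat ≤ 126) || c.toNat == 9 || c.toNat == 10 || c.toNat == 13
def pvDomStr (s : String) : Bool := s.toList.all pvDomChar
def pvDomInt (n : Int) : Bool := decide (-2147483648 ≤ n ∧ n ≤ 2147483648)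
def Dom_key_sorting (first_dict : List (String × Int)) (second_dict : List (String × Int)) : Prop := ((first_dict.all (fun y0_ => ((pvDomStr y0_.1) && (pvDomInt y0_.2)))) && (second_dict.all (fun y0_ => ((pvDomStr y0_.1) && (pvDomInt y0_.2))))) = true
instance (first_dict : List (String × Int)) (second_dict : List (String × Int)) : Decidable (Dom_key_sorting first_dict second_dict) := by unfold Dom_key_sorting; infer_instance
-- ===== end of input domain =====

-- B replaces A's remove-mutating loop with a precomputed set of equal-common keys, a
-- sorted distinct union, and three independent order-preserving filters (simpler).

-- ===== PORT A =====
-- the body of A's 'for key in first_keys_copy' loop, acting on the state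
-- (all_keys, first_keys, second_keys, equal_keys); list.remove = List.erase
-- (the removed key is always present on inputs satisfying Pre_)
def keySortStep (second_keys_copy : List String) (fd sd : PySem.Dict String Int)
    (st : List String × List String × List String × List String) (key : String) :
    List String × List String × List String × List String :=
  let (al, fk, sk, ek) := st
  if key ∈ second_keys_copy then
    if fd.get? key = sd.get? key then
      (al.erase key, fk.erase key, sk.erase key, ek ++ [key])
    else
      (al.erase key, fk, sk, ek)
  else
    (al, fk, sk, ek)

def key_sorting (first_dict : List (String × Int)) (second_dict : List (String × Int)) : List String × List String × List String × List String :=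
  let first_keys := first_dict.map Prod.fst
  let second_keys := second_dict.map Prod.fst
  -- all_keys = first_keys + second_keys, then .sort()
  let all_keys := PySem.List.sorted (first_keys ++ second_keys) (fun x => x)
  let st := first_keys.foldl
    (keySortStep second_keys (PySem.Dict.mk first_dict) (PySem.Dict.mk second_dict))
    (all_keys, first_keys, second_keys, [])
  (st.1, st.2.1, st.2.2.1, st.2.2.2)

-- ===== PORT B =====
def key_sorting_alt (first_dict : List (String × Int)) (second_dict : List (String × Int)) : List String × List String × List String × List String :=
  let sd := PySem.Dict.mk second_dict
  -- equal = {k for k, v in first_dict.items() if k in second_dict and second_dict[k] == v}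
  let equal : PySem.Set String :=
    PySem.Set.ofList ((first_dict.filter (fun p => sd.get? p.1 == some p.2)).map Prod.fst)
  -- all_keys = sorted(set(first_dict) | set(second_dict))
  let all_keys := PySem.List.sorted
    (PySem.Set.union (PySem.Set.ofList (first_dict.map Prod.fst))
                     (PySem.Set.ofList (second_dict.map Prod.fst))) (fun x => x)
  let first_keys := (first_dict.map Prod.fst).filter (fun k => !(PySem.Set.contains equal k))
  let second_keys := (second_dict.map Prod.fst).filter (fun k => !(PySem.Set.contains equal k))
  let equal_keys := (first_dict.map Prod.fst).filter (fun k => PySem.Set.contains equal k)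
  (all_keys, first_keys, second_keys, equal_keys)

-- ===== PRECONDITION & SPEC =====
-- Pre_ requires each argument's keys to be distinct: the arguments ARE Python dicts, whose
-- keys are always distinct, so this excludes only association lists that represent no dict.
def Pre_key_sorting (first_dict : List (String × Int)) (second_dict : List (String × Int)) : Prop :=
  (first_dict.map Prod.fst).Nodup ∧ (second_dict.map Prod.fst).Nodup
instance (first_dict : List (String × Int)) (second_dict : List (String × Int)) : Decidable (Pre_key_sorting first_dict second_dict) := by unfold Pre_key_sorting; infer_instance
def pvWitness_key_sorting : (List (String × Int)) × (List (String × Int)) :=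
  ([("a", 1), ("b", 2)], [("b", 2), ("c", 3)])

def Spec_key_sorting (first_dict : List (String × Int)) (second_dict : List (String × Int)) (out : List String × List String × List String × List String) : Prop := out = key_sorting_alt first_dict second_dict
instance (first_dict : List (String × Int)) (second_dict : List (String × Int)) (out : List String × List String × List String × List String) : Decidable (Spec_key_sorting first_dict second_dict out) := by unfold Spec_key_sorting; infer_instance

-- ===== CLAIM (what is proved, stated in full; the proofs are below) =====
def Claim_equal_key_sorting : Prop := ∀ (first_dict : List (String × Int)) (second_dict : List (String × Int)), Dom_key_sorting first_dict second_dict → Pre_key_sorting first_dict second_dict → Spec_key_sorting first_dict second_dict (key_sorting first_dict second_dict)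

-- ===== LEMMAS AND PROOFS =====

-- A's loop over L: each component of the state is a diff / append by the filtered prefix.
lemma keySort_loop_eq (S : List String) (fd sd : PySem.Dict String Int) :
    ∀ (L al fk sk ek : List String),
      L.foldl (keySortStep S fd sd) (al, fk, sk, ek) =
        (al.diff (L.filter (fun k => decide (k ∈ S))),
         fk.diff (L.filter (fun k => decide (k ∈ S) && decide (fd.get? k = sd.get? k))),
         sk.diff (L.filter (fun k => decide (k ∈ S) && decide (fd.get? k = sd.get? k))),
         ek ++ L.filter (fun k => decide (k ∈ S) && decide (fd.get? k = sd.get? k))) := by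
  intro L
  induction L with
  | nil => intro al fk sk ek; simp [List.foldl]
  | cons x t ih =>
    intro al fk sk ek
    simp only [List.foldl_cons, List.filter_cons]
    by_cases hx : x ∈ S
    · by_cases hv : fd.get? x = sd.get? x
      · simp [keySortStep, hx, hv, ih, List.diff_cons]
      · simp [keySortStep, hx, hv, ih, List.diff_cons]
    · simp [keySortStep, hx, ih]

theorem key_sorting_spec : Claim_equal_key_sorting := by
  intro fd' sd' _hdom hpre
  obtain ⟨h1, h2⟩ := hpre
  unfold Spec_key_sorting key_sorting key_sorting_alt
  simp only []
  set F := fd'.map Prod.fst with hF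
  set S := sd'.map Prod.fst with hS
  set fdD := PySem.Dict.mk fd' with hfdD
  set sdD := PySem.Dict.mk sd' with hsdD
  have hkeysF : fdD.keys = F := PySem.Dict.keys_mk fd'
  rw [keySort_loop_eq]
  set P : String → Bool :=
    fun k => decide (k ∈ S) && decide (fdD.get? k = sdD.get? k) with hP
  set equal : PySem.Set String :=
    PySem.Set.ofList ((fd'.filter (fun p => sdD.get? p.1 == some p.2)).map Prod.fst) with heq
  -- membership in the filtered-keys list, spelled out
  have hmemiff : ∀ k, k ∈ ((fd'.filter (fun p => sdD.get? p.1 == some p.2)).map Prod.fst) ↔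
      ∃ v, (k, v) ∈ fd' ∧ sdD.get? k = some v := by
    intro k
    constructor
    · intro hk
      obtain ⟨⟨a, v⟩, hm, he⟩ := List.mem_map.mp hk
      obtain ⟨hin, hc⟩ := List.mem_filter.mp hm
      refine ⟨v, ?_, ?_⟩
      · rw [← he]; exact hin
      · rw [← he]; exact beq_iff_eq.mp hc
    · rintro ⟨v, hin, hv⟩
      exact List.mem_map.mpr ⟨(k, v), List.mem_filter.mpr ⟨hin, beq_iff_eq.mpr hv⟩, rfl⟩
  -- central characterization of B's 'equal' set
  have hcentral : ∀ k, PySem.Set.contains equal k = true ↔ (k ∈ F ∧ P k = true) := by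
    intro k
    rw [PySem.Set.contains_iff, heq, PySem.Set.mem_ofList, hmemiff]
    constructor
    · rintro ⟨v, hin, hv⟩
      have hfd : fdD.get? k = some v := by
        rw [PySem.Dict.get?_eq_some_iff_mem_items fdD k v (by rw [hkeysF]; exact h1)]
        exact hin
      have hkF : k ∈ F := by rw [hF]; exact List.mem_map.mpr ⟨(k, v), hin, rfl⟩
      have hkS : k ∈ S := by
        have hit : (k, v) ∈ sdD.items := PySem.Dict.mem_items_of_get?_eq_some sdD hv
        rw [hS]; exact List.mem_map.mpr ⟨(k, v), hit, rfl⟩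
      refine ⟨hkF, ?_⟩
      rw [hP]
      simp only [Bool.and_eq_true, decide_eq_true_eq]
      exact ⟨hkS, by rw [hfd, hv]⟩
    · rintro ⟨hkF, hPk⟩
      have hex : ∃ v, (k, v) ∈ fd' := by
        obtain ⟨⟨a, v⟩, hin, he⟩ := List.mem_map.mp (hF ▸ hkF)
        exact ⟨v, by rw [← he]; exact hin⟩
      obtain ⟨v, hin⟩ := hex
      have hfd : fdD.get? k = some v := by
        rw [PySem.Dict.get?_eq_some_iff_mem_items fdD k v (by rw [hkeysF]; exact h1)]
        exact hin
      rw [hP] at hPk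
      simp only [Bool.and_eq_true, decide_eq_true_eq] at hPk
      exact ⟨v, hin, by rw [← hPk.2]; exact hfd⟩
  have hmemE : ∀ k, k ∈ equal ↔ (k ∈ F ∧ P k = true) := fun k =>
    (PySem.Set.contains_iff equal k).symm.trans (hcentral k)
  have hcfalse : ∀ k, ¬ (k ∈ F ∧ P k = true) → PySem.Set.contains equal k = false := by
    intro k hnk
    cases h : PySem.Set.contains equal k with
    | false => rfl
    | true => exact absurd ((hcentral k).mp h) hnk
  refine Prod.ext ?_ (Prod.ext ?_ (Prod.ext ?_ ?_))
  -- all_keys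
  · show (PySem.List.sorted (F ++ S) (fun x => x)).diff
        ((F.filter (fun k => decide (k ∈ S)))) =
      PySem.List.sorted (PySem.Set.union (PySem.Set.ofList F) (PySem.Set.ofList S)) (fun x => x)
    rw [PySem.Set.ofList_eq_self_of_nodup F h1, PySem.Set.ofList_eq_self_of_nodup S h2]
    have hunion : PySem.Set.union F S =
        F ++ S.filter (fun y => !(PySem.Set.contains F y)) := by
      have h := PySem.Set.update_eq_append_filter (α := String) F S
      rw [PySem.Set.ofList_eq_self_of_nodup S h2] at h
      exact h
    set C := F.filter (fun k => decide (k ∈ S)) with hC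
    set U := F ++ S.filter (fun y => !(PySem.Set.contains F y)) with hU
    have hUnodup : U.Nodup := by
      rw [← hunion]; exact PySem.Set.nodup_union F S h1
    have hperm : ((PySem.List.sorted (F ++ S) (fun x => x)).diff C).Perm U := by
      have hp1 : ((PySem.List.sorted (F ++ S) (fun x => x)).diff C).Perm ((F ++ S).diff C) :=
        List.Perm.diff_right C (PySem.List.sorted_perm (F ++ S) (fun x => x) false)
      refine hp1.trans (List.perm_iff_count.mpr ?_)
      intro a
      have hcF : List.count a F = if a ∈ F then 1 else 0 := by
        split
        · exact List.count_eq_one_of_mem h1 (by assumption)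
        · exact List.count_eq_zero.mpr (by assumption)
      have hcS : List.count a S = if a ∈ S then 1 else 0 := by
        split
        · exact List.count_eq_one_of_mem h2 (by assumption)
        · exact List.count_eq_zero.mpr (by assumption)
      have hcC : List.count a C = if a ∈ F ∧ a ∈ S then 1 else 0 := by
        rw [hC]
        by_cases haS : a ∈ S
        · rw [List.count_filter (by simp [haS])]
          simp [haS, hcF]
        · have hnm : a ∉ F.filter (fun k => decide (k ∈ S)) := by
            intro hmem
            exact haS (by simpa using (List.mem_filter.mp hmem).2)
          rw [List.count_eq_zero.mpr hnm]
          simp [haS]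
      have hcSf : List.count a (S.filter (fun y => !(PySem.Set.contains F y))) =
          if a ∈ S ∧ a ∉ F then 1 else 0 := by
        by_cases haF : a ∈ F
        · have hnm : a ∉ S.filter (fun y => !(PySem.Set.contains F y)) := by
            intro hmem
            have hb := (List.mem_filter.mp hmem).2
            rw [Bool.not_eq_eq_eq_not, Bool.not_true, ← Bool.not_eq_true] at hb
            exact hb ((PySem.Set.contains_iff F a).mpr haF)
          rw [List.count_eq_zero.mpr hnm]; simp [haF]
        · rw [List.count_filter (by simpa using haF)]
          simp [haF, hcS]
      rw [List.count_diff, hU, List.count_append, List.count_append, hcF, hcS, hcC, hcSf]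
      by_cases haF : a ∈ F <;> by_cases haS : a ∈ S <;> simp [haF, haS]
    have hpairlt : List.Pairwise (fun a b : String => a < b)
        ((PySem.List.sorted (F ++ S) (fun x => x)).diff C) := by
      have hle : List.Pairwise (fun a b : String => a ≤ b)
          ((PySem.List.sorted (F ++ S) (fun x => x)).diff C) :=
        List.Pairwise.sublist (List.diff_sublist _ _)
          (PySem.List.sorted_pairwise (F ++ S) (fun x => x))
      have hnd : ((PySem.List.sorted (F ++ S) (fun x => x)).diff C).Nodup :=
        hperm.nodup_iff.mpr hUnodup
      exact (hle.and hnd).imp (fun h => lt_of_le_of_ne h.1 h.2)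
    rw [hunion]
    exact (PySem.List.sorted_eq_of_perm_of_pairwise_lt U _ (fun x => x) hperm hpairlt).symm
  -- first_keys
  · show F.diff (F.filter P) = F.filter (fun k => !(PySem.Set.contains equal k))
    rw [List.Nodup.diff_eq_filter h1]
    refine List.filter_congr ?_
    intro k hk
    by_cases hPk : P k = true
    · have hmm : k ∈ F.filter P := List.mem_filter.mpr ⟨hk, hPk⟩
      have hm : k ∈ equal := (hmemE k).mpr ⟨hk, hPk⟩
      simp [hmm, hm]
    · have hnm : k ∉ F.filter P := fun hmm => hPk (List.mem_filter.mp hmm).2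
      have hm : k ∉ equal := fun h => hPk ((hmemE k).mp h).2
      simp [hnm, hm]
  -- second_keys
  · show S.diff (F.filter P) = S.filter (fun k => !(PySem.Set.contains equal k))
    rw [List.Nodup.diff_eq_filter h2]
    refine List.filter_congr ?_
    intro k _hk
    by_cases hm : k ∈ equal
    · obtain ⟨hkF, hPk⟩ := (hmemE k).mp hm
      have hmm : k ∈ F.filter P := List.mem_filter.mpr ⟨hkF, hPk⟩
      simp [hmm, hm]
    · have hnm : k ∉ F.filter P := fun hmm =>
        hm ((hmemE k).mpr ⟨(List.mem_filter.mp hmm).1, (List.mem_filter.mp hmm).2⟩)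
      simp [hnm, hm]
  -- equal_keys
  · show [] ++ F.filter P = F.filter (fun k => PySem.Set.contains equal k)
    rw [List.nil_append]
    refine List.filter_congr ?_
    intro k hk
    by_cases hPk : P k = true
    · simp only [hPk, (hcentral k).mpr ⟨hk, hPk⟩]
    · have hc := hcfalse k (fun h => hPk h.2)
      simp only [Bool.not_eq_true] at hPk
      simp only [hPk, hc]
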